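-- pv_equiv track=rewrite | github.com/Brandon-Valley/white_paper_art | logger.py | formatsMatch
-- ===== SOURCE A (Python) =====
-- def formatsMatch(dataDict, csvData):
--     #if the csv is empty, no need for a backup
--     if csvData == []:
--         return True
--
--     for header, data in dataDict.items():
--         if header not in csvData[0]:
--             return False
--
--     for header in csvData[0]:
--         if header not in dataDict.keys():
--             return False
--
--     return True
-- ===== SOURCE B (Python) =====
-- def formatsMatch(dataDict, csvData):
--     if csvData == []:
--         return True
--     # canonical form: the sorted list of distinct keys; two collections have
--     # equal key sets iff their canonical forms are identical lists
--     return sorted(set(dataDict.keys())) == sorted(set(csvData[0]))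
-- ===== Notes on version B (the rewrite author's own statement) =====
-- stated objective: alternative
-- what changed: Replaces the two early-returning membership-scan loops by comparing canonical forms: each side's distinct keys are sorted and the two sorted lists are compared for equality (sort-then-compare instead of bidirectional membership scanning).
import Mathlib
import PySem

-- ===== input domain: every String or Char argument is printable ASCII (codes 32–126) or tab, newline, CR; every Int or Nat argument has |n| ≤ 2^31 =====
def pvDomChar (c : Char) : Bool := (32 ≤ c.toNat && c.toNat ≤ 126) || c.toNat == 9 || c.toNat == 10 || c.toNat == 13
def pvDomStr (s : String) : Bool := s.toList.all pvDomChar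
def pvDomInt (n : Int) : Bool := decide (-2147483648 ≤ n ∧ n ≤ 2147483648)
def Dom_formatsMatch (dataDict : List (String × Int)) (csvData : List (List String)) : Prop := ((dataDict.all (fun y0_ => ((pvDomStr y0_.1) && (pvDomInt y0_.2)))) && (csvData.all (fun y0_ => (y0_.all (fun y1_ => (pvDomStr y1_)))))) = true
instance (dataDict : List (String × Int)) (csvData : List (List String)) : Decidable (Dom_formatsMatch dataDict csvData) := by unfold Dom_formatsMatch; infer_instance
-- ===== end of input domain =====

-- ===== PORT A =====
-- Transliteration of A: equality-with-[] guard, then two membership-scanning loops with early returns.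
def formatsMatch (dataDict : List (String × Int)) (csvData : List (List String)) : Bool :=
  if csvData = [] then true
  else
    let row := csvData.headI   -- csvData[0]; safe: csvData ≠ []
    if dataDict.any (fun p => !(row.contains p.1)) then false
    else if row.any (fun h => !((dataDict.map Prod.fst).contains h)) then false
    else true

-- ===== PORT B =====
-- B: same [] guard, then compare canonical forms: sorted(set(keys)) == sorted(set(csvData[0])).
def formatsMatch_alt (dataDict : List (String × Int)) (csvData : List (List String)) : Bool :=
  if csvData = [] then true
  else
    decide (PySem.List.sorted (PySem.Set.ofList (dataDict.map Prod.fst)) (fun x => x) false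
          = PySem.List.sorted (PySem.Set.ofList csvData.headI) (fun x => x) false)

-- ===== PRECONDITION & SPEC =====
def Spec_formatsMatch (dataDict : List (String × Int)) (csvData : List (List String)) (out : Bool) : Prop := out = formatsMatch_alt dataDict csvData
instance (dataDict : List (String × Int)) (csvData : List (List String)) (out : Bool) : Decidable (Spec_formatsMatch dataDict csvData out) := by unfold Spec_formatsMatch; infer_instance

-- ===== CLAIM =====
def Claim_equal_formatsMatch : Prop := ∀ (dataDict : List (String × Int)) (csvData : List (List String)), Dom_formatsMatch dataDict csvData → Spec_formatsMatch dataDict csvData (formatsMatch dataDict csvData)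

-- ===== LEMMAS AND PROOFS =====

-- two sorted dedup lists are equal iff the originals have the same members
theorem sorted_ofList_eq_iff (xs ys : List String) :
    (PySem.List.sorted (PySem.Set.ofList xs) (fun x => x) false
      = PySem.List.sorted (PySem.Set.ofList ys) (fun x => x) false)
    ↔ (∀ a, a ∈ xs ↔ a ∈ ys) := by
  rw [PySem.List.sorted_id_eq_sorted_id_iff_perm,
    List.perm_ext_iff_of_nodup (PySem.Set.nodup_ofList xs) (PySem.Set.nodup_ofList ys)]
  constructor <;> intro h a <;> simpa [PySem.Set.mem_ofList] using h a

-- ===== VERDICT =====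
theorem formatsMatch_spec : Claim_equal_formatsMatch := by
  intro dataDict csvData _
  unfold Spec_formatsMatch formatsMatch formatsMatch_alt
  cases csvData with
  | nil => rfl
  | cons row rest =>
    simp only [List.headI, reduceCtorEq, if_false]
    rw [Bool.eq_iff_iff, decide_eq_true_iff, sorted_ofList_eq_iff]
    simp [List.any_eq_true, List.mem_map]
    constructor
    · rintro ⟨h1, h2⟩ a
      exact ⟨fun ⟨v, hv⟩ => h1 a v hv, fun ha => h2 a ha⟩
    · intro h
      exact ⟨fun k v hkv => (h k).1 ⟨v, hkv⟩, fun a ha => (h a).2 ha⟩
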